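-- pv_equiv track=rewrite | github.com/ocorreag/agipro-agent | src/json_parser.py | _attempt_json_repair
-- ===== SOURCE A (Python) =====
-- def _attempt_json_repair(json_str: str) -> str:
--     """Attempt basic JSON repairs"""
--
--     # Try to fix unescaped quotes more aggressively
--     # Split by lines and fix line by line
--     lines = json_str.split('\n')
--     fixed_lines = []
--
--     for line in lines:
--         # Fix lines that look like: "key": "value with "quotes" inside"
--         # This is a simplified approach
--         if '":' in line and line.count('"') > 2:
--             # Find the key part
--             key_end = line.find('":')
--             if key_end != -1:
--                 key_part = line[:key_end + 2]  # Include ":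
--                 value_part = line[key_end + 2:].strip()
--
--                 # If value starts and ends with quotes, fix internal quotes
--                 if value_part.startswith('"') and value_part.endswith('"'):
--                     value_content = value_part[1:-1]  # Remove surrounding quotes
--                     # Escape internal quotes
--                     value_content = value_content.replace('"', '\\"')
--                     fixed_line = key_part + ' "' + value_content + '"'
--                     fixed_lines.append(fixed_line)
--                     continue
--
--         fixed_lines.append(line)
--
--     return '\n'.join(fixed_lines)
-- ===== SOURCE B (Python) =====
-- import re
--
-- # One regex pass over the whole string (MULTILINE, one anchored match per line)
-- # instead of split('\n') + per-line find/strip/startswith bookkeeping.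
-- # Group 1 is the key part up to the FIRST '":' (the tempered dot forbids an
-- # earlier '":' inside it, matching line.find('":')); the value must be a
-- # quoted chunk surrounded only by line-local whitespace ([ \t\r], which is what
-- # .strip() removes inside a '\n'-split line of the ASCII domain).
-- _QUOTED_VALUE = re.compile(r'^((?:(?!":).)*":)[ \t\r]*"(.*)"[ \t\r]*$', re.MULTILINE)
--
--
-- def _attempt_json_repair(json_str: str) -> str:
--     """Attempt basic JSON repairs"""
--     return _QUOTED_VALUE.sub(
--         lambda m: m.group(1) + ' "' + m.group(2).replace('"', '\\"') + '"',
--         json_str)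
-- ===== Notes on version B (the rewrite author's own statement) =====
-- stated objective: idiomatic
-- what changed: The split('\n')/loop with find('\":')/strip/startswith/endswith bookkeeping is replaced by one precompiled MULTILINE regex substitution whose anchored pattern matches a repairable line and whose replacement function rebuilds it; this trades speed for brevity (the regex engine is measurably slower on large quote-heavy inputs).
-- outside the precondition, e.g. on _attempt_json_repair('"a": "'): A returns '"a": ""', B returns '"a": "'
import Mathlib
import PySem

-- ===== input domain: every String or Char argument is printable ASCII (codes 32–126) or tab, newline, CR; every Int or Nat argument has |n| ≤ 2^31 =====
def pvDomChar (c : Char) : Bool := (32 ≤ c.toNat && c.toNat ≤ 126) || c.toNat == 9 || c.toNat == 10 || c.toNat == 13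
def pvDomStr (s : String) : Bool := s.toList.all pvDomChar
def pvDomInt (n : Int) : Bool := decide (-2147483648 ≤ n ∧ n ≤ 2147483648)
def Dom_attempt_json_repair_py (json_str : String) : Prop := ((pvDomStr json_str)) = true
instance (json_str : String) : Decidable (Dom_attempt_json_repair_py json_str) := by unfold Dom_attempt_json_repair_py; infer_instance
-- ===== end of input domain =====

-- B replaces A's split('\n')+loop with find/strip/startswith bookkeeping by one anchored
-- MULTILINE regex substitution (objective: idiomatic; same asymptotic cost).

-- ===== PORT A =====
-- per-line body of A's loop (the if/continue chain, branches in source order)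
def pvFixLineA (line : List Char) : List Char :=
  if PySem.Chars.isIn ['"', ':'] line = true ∧ 2 < PySem.Chars.count line ['"'] then
    let key_end := PySem.Chars.find line ['"', ':']
    if key_end ≠ -1 then
      let key_part := PySem.Chars.slice line none (some (key_end + 2))
      let value_part := PySem.Chars.strip (PySem.Chars.slice line (some (key_end + 2)) none)
      if PySem.Chars.startswith value_part ['"'] = true ∧ PySem.Chars.endswith value_part ['"'] = true then
        key_part ++ [' ', '"'] ++
          PySem.Chars.replace (PySem.Chars.slice value_part (some 1) (some (-1))) ['"'] ['\\', '"'] ++ ['"']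
      else line
    else line
  else line

def attempt_json_repair_py (json_str : String) : String :=
  let lines := PySem.Chars.splitOn json_str.toList ['\n']
  let fixed_lines := lines.foldl (fun acc line => acc ++ [pvFixLineA line]) []
  String.ofList (PySem.Chars.join ['\n'] fixed_lines)

-- ===== PORT B =====
-- Hand-port of Source B's single compiled regex  ^((?:(?!":).)*":)[ \t\r]*"(.*)"[ \t\r]*$  with
-- re.MULTILINE, applied by re.sub with replacement  \1 + ' "' + \2.replace('"','\\"') + '"'.
-- No regex engine exists in Lean, so the pattern is transcribed exactly, piece by piece:
-- since '.'/'[ \t\r]' never match '\n' and the pattern is anchored ^…$, re.sub in MULTILINE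
-- mode rewrites each '\n'-separated line independently — hence splitOn/map/join below.

-- the character class [ \t\r]
def pvWsB (c : Char) : Bool := c == ' ' || c == '\t' || c == '\r'

-- '^((?:(?!":).)*":)': group 1 = the line up to (and including) its FIRST '":'
-- (the tempered dot (?!":). cannot step over an earlier occurrence); none = no '":' = no match
def pvKeySplit (acc : List Char) : List Char → Option (List Char × List Char)
  | c1 :: c2 :: rest =>
      if c1 = '"' ∧ c2 = ':' then some (acc ++ [c1, c2], rest)
      else pvKeySplit (acc ++ [c1]) (c2 :: rest)
  | _ => none

-- '[ \t\r]*"(.*)"[ \t\r]*$' on the remainder of the line: the leading class eats the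
-- whitespace run before the opening '"'; the greedy '(.*)' ends at the LAST '"' that is
-- followed only by [ \t\r]* up to $, i.e. at the closing quote found by stripping the
-- class from the right; group 2 = what lies between the two quotes
def pvTailMatch (rest : List Char) : Option (List Char) :=
  match rest.dropWhile pvWsB with
  | c :: r2 =>
      if c = '"' then
        match r2.reverse.dropWhile pvWsB with
        | d :: midRev => if d = '"' then some midRev.reverse else none
        | [] => none
      else none
  | [] => none

-- one match attempt of the anchored pattern on one line + the replacement function
def pvRepairLine (line : List Char) : List Char :=
  match pvKeySplit [] line with
  | some (g1, rest) =>
      match pvTailMatch rest with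
      | some g2 => g1 ++ [' ', '"'] ++ PySem.Chars.replace g2 ['"'] ['\\', '"'] ++ ['"']
      | none => line
  | none => line

def attempt_json_repair_py_alt (json_str : String) : String :=
  String.ofList (PySem.Chars.join ['\n'] ((PySem.Chars.splitOn json_str.toList ['\n']).map pvRepairLine))

-- ===== PRECONDITION & SPEC =====
-- Pre_ excludes strings containing a line whose text after its first '":' strips to a lone
-- '"' (an unterminated quoted value) while the line holds more than two quotes: there A
-- invents an empty value '""' and B leaves the malformed line unchanged — both behaviours
-- are defensible on such input and neither is specified.
def Pre_attempt_json_repair_py (json_str : String) : Prop :=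
  ∀ line ∈ PySem.Chars.splitOn json_str.toList ['\n'],
    ¬(PySem.Chars.isIn ['"', ':'] line = true ∧ 2 < PySem.Chars.count line ['"'] ∧
      PySem.Chars.strip (PySem.Chars.slice line (some (PySem.Chars.find line ['"', ':'] + 2)) none) = ['"'])
instance (json_str : String) : Decidable (Pre_attempt_json_repair_py json_str) := by
  unfold Pre_attempt_json_repair_py; infer_instance

def pvWitness_attempt_json_repair_py : String := "\"k\": \"a \"b\" c\""

def Spec_attempt_json_repair_py (json_str : String) (out : String) : Prop := out = attempt_json_repair_py_alt json_str
instance (json_str : String) (out : String) : Decidable (Spec_attempt_json_repair_py json_str out) := by unfold Spec_attempt_json_repair_py; infer_instance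

-- ===== CLAIM (what is proved, stated in full; the proofs are below) =====
def Claim_equal_attempt_json_repair_py : Prop := ∀ (json_str : String), Dom_attempt_json_repair_py json_str → Pre_attempt_json_repair_py json_str → Spec_attempt_json_repair_py json_str (attempt_json_repair_py json_str)

-- ===== LEMMAS AND PROOFS =====

-- on domain characters other than '\n', Python's str.strip whitespace is exactly [ \t\r]
theorem pvWs_eq (c : Char) (hdom : pvDomChar c = true) (hn : c ≠ '\n') :
    PySem.Chars.isspace c = pvWsB c := by
  have hn' : c.toNat ≠ 10 := fun h => hn (Char.ext (UInt32.toNat_inj.mp (by simpa using h)))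
  have hdom' : (32 ≤ c.toNat ∧ c.toNat ≤ 126) ∨ c.toNat = 9 ∨ c.toNat = 10 ∨ c.toNat = 13 := by
    have := hdom
    simp only [pvDomChar, Bool.or_eq_true, Bool.and_eq_true, decide_eq_true_eq, beq_iff_eq] at this
    tauto
  have e : ∀ d : Char, (c == d) = decide (c.toNat = d.toNat) := by
    intro d
    by_cases h : c = d
    · simp [h]
    · have hne : c.toNat ≠ d.toNat := fun hh => h (Char.ext (UInt32.toNat_inj.mp (by simpa using hh)))
      simp [h, hne]
  rw [PySem.Chars.isspace]
  rw [pvWsB, e ' ', e '\t', e '\r']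
  have e1 : (' ' : Char).toNat = 32 := rfl
  have e2 : ('\t' : Char).toNat = 9 := rfl
  have e3 : ('\r' : Char).toNat = 13 := rfl
  rw [e1, e2, e3]
  apply Bool.eq_iff_iff.mpr
  simp only [Bool.or_eq_true, Bool.and_eq_true, decide_eq_true_eq]
  omega

-- every character of every line of splitOn s ['\n'] is a non-'\n' character of s
theorem pvSplitOnGo_mem (P : Char → Prop) :
    ∀ (fuel : Nat) (l cur : List Char) (acc : List (List Char)),
      l.length < fuel →
      (∀ a ∈ acc, ∀ c ∈ a, P c) → (∀ c ∈ cur, P c) → (∀ c ∈ l, c ≠ '\n' → P c) →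
      ∀ line ∈ PySem.Chars.splitOn.go ['\n'] fuel l cur acc, ∀ c ∈ line, P c := by
  intro fuel
  induction fuel with
  | zero => intro l cur acc h; omega
  | succ fuel ih =>
    intro l cur acc hlen hacc hcur hl line hline c hc
    match l, hline with
    | [], hline => ?_
    | ch :: rest, hline => ?_
    · rw [PySem.Chars.splitOn.go] at hline
      simp only [List.mem_reverse, List.mem_cons] at hline
      rcases hline with h | h
      · exact hcur c (by simpa [h] using hc)
      · exact hacc line h c hc
      · omega
    · rw [PySem.Chars.splitOn.go] at hline
      by_cases hpre : ['\n'].isPrefixOf (ch :: rest) = true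
      · rw [if_pos hpre] at hline
        have : List.drop (List.length ['\n']) (ch :: rest) = rest := by simp
        rw [this] at hline
        refine ih rest [] ((cur.reverse) :: acc) (by simp at hlen; omega) ?_ (by simp) ?_ line hline c hc
        · intro a ha d hd
          rcases List.mem_cons.mp ha with h | h
          · exact hcur d (by simpa [h] using hd)
          · exact hacc a h d hd
        · intro d hd hdn; exact hl d (List.mem_cons_of_mem _ hd) hdn
      · rw [if_neg hpre] at hline
        have hch : ch ≠ '\n' := by
          intro h; apply hpre; simp [List.isPrefixOf, h]
        refine ih rest (ch :: cur) acc (by simp at hlen; omega) hacc ?_ ?_ line hline c hc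
        · intro d hd
          rcases List.mem_cons.mp hd with h | h
          · exact h ▸ hl ch List.mem_cons_self hch
          · exact hcur d h
        · intro d hd hdn; exact hl d (List.mem_cons_of_mem _ hd) hdn

theorem pvSplitOn_mem (P : Char → Prop) (s : List Char) (hs : ∀ c ∈ s, c ≠ '\n' → P c) :
    ∀ line ∈ PySem.Chars.splitOn s ['\n'], ∀ c ∈ line, P c := by
  intro line hline
  rw [PySem.Chars.splitOn] at hline
  exact pvSplitOnGo_mem P (s.length + 1) s [] [] (by omega) (by simp) (by simp) hs line hline

-- Chars.count with a single-character needle is List.count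
theorem pvCountGo_char (ch : Char) :
    ∀ (fuel : Nat) (l : List Char) (acc : Nat), l.length ≤ fuel →
      PySem.Chars.count.go [ch] fuel l acc = acc + l.count ch := by
  intro fuel
  induction fuel with
  | zero =>
    intro l acc h
    have : l = [] := List.eq_nil_of_length_eq_zero (by omega)
    subst this
    rw [PySem.Chars.count.go]
    simp
  | succ fuel ih =>
    intro l acc h
    match l with
    | [] => rw [PySem.Chars.count.go] <;> simp
    | c :: t =>
      rw [PySem.Chars.count.go]
      by_cases hc : c = ch
      · rw [if_pos (by simp [List.isPrefixOf, hc])]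
        have : List.drop (List.length [ch]) (c :: t) = t := by simp
        rw [this, ih t (acc + 1) (by simp at h; omega)]
        simp [hc]
        omega
      · rw [if_neg (by simp [List.isPrefixOf]; exact fun hh => hc (hh ▸ rfl))]
        rw [ih t acc (by simp at h; omega)]
        simp [hc]

theorem pvCount_char (l : List Char) (ch : Char) : PySem.Chars.count l [ch] = l.count ch := by
  rw [PySem.Chars.count]
  simp only [List.isEmpty_cons, if_false, Bool.false_eq_true]
  exact (pvCountGo_char ch l.length l 0 le_rfl).trans (by omega)

-- pvKeySplit finds the first occurrence of '":'
theorem pvKeySplit_of_first (l : List Char) (i : Nat) (acc : List Char)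
    (h1 : ['"', ':'] <+: l.drop i) (h2 : ∀ k < i, ¬ ['"', ':'] <+: l.drop k) :
    pvKeySplit acc l = some (acc ++ l.take (i + 2), l.drop (i + 2)) := by
  induction l generalizing acc i with
  | nil => simp at h1
  | cons c1 rest ih =>
    match i with
    | 0 =>
      obtain ⟨t, ht⟩ := h1
      rw [List.drop_zero] at ht
      have ht' : c1 :: rest = '"' :: ':' :: t := by simpa using ht.symm
      match c1, rest, ht' with
      | _, _, rfl =>
        rw [pvKeySplit, if_pos ⟨rfl, rfl⟩]
        simp
    | i + 1 =>
      have hh1 : ['"', ':'] <+: rest.drop i := by simpa using h1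
      match rest with
      | [] => simp at hh1
      | c2 :: rest2 =>
        have hcond : ¬(c1 = '"' ∧ c2 = ':') := by
          intro ⟨ha, hb⟩
          exact h2 0 (by omega) (by subst ha; subst hb; exact ⟨rest2, by simp⟩)
        rw [pvKeySplit, if_neg hcond]
        rw [ih i (acc ++ [c1]) hh1 (fun k hk => by simpa using h2 (k+1) (by omega))]
        simp [List.take_succ_cons, List.drop_succ_cons]

theorem pvKeySplit_none (l acc : List Char) (h : ¬ ['"', ':'] <:+: l) :
    pvKeySplit acc l = none := by
  induction l generalizing acc with
  | nil => rfl
  | cons c1 rest ih =>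
    match rest with
    | [] => rfl
    | c2 :: rest2 =>
      rw [pvKeySplit, if_neg (fun ⟨ha, hb⟩ => h (by subst ha; subst hb; exact ⟨[], rest2, by simp⟩))]
      exact ih (acc ++ [c1]) (fun hi => h (hi.trans (List.suffix_cons c1 (c2 :: rest2)).isInfix))

-- dropWhile only looks at members
theorem pvDropWhile_congr (p q : Char → Bool) (l : List Char) (h : ∀ c ∈ l, p c = q c) :
    l.dropWhile p = l.dropWhile q := by
  induction l with
  | nil => rfl
  | cons c t ih =>
    simp only [List.dropWhile_cons, h c (List.mem_cons_self), ih fun x hx => h x (List.mem_cons_of_mem _ hx)]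

theorem pvDropWhile_head_false (p : Char → Bool) (l r : List Char) (c : Char)
    (h : l.dropWhile p = c :: r) : p c = false := by
  induction l with
  | nil => simp at h
  | cons a t ih =>
    rw [List.dropWhile_cons] at h
    by_cases hp : p a
    · simp [hp] at h; exact ih h
    · simp [hp] at h; rw [← h.1]; simpa using hp

-- the tail matcher agrees with A's strip/startswith/endswith test (away from a lone-quote value)
theorem pvTailMatch_spec (rest : List Char)
    (hw : ∀ c ∈ rest, PySem.Chars.isspace c = pvWsB c)
    (hne : PySem.Chars.strip rest ≠ ['"']) :
    pvTailMatch rest =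
      if PySem.Chars.startswith (PySem.Chars.strip rest) ['"'] = true ∧
         PySem.Chars.endswith (PySem.Chars.strip rest) ['"'] = true then
        some (PySem.Chars.slice (PySem.Chars.strip rest) (some 1) (some (-1)))
      else none := by
  have hls : rest.dropWhile PySem.Chars.isspace = rest.dropWhile pvWsB :=
    pvDropWhile_congr _ _ _ hw
  cases hr1 : rest.dropWhile pvWsB with
  | nil =>
    have hstrip : PySem.Chars.strip rest = [] := by
      rw [PySem.Chars.strip, PySem.Chars.lstrip, hls, hr1, PySem.Chars.rstrip]
      simp
    rw [pvTailMatch, hr1, hstrip]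
    rw [if_neg (by simp [PySem.Chars.startswith, List.isPrefixOf])]
  | cons c r2 =>
    have hsub1 : ∀ x ∈ c :: r2, PySem.Chars.isspace x = pvWsB x := by
      intro x hx
      exact hw x ((hr1 ▸ List.dropWhile_sublist pvWsB).subset hx)
    have hcws : pvWsB c = false := pvDropWhile_head_false pvWsB rest r2 c hr1
    have hstrip : PySem.Chars.strip rest
        = ((r2.reverse ++ [c]).dropWhile pvWsB).reverse := by
      rw [PySem.Chars.strip, PySem.Chars.lstrip, hls, hr1, PySem.Chars.rstrip]
      have : (c :: r2).reverse = r2.reverse ++ [c] := by simp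
      rw [this, pvDropWhile_congr _ _ _ (fun x hx => hsub1 x (by
        rcases (by simpa using hx : x ∈ r2 ∨ x = c) with h | h
        · exact List.mem_cons_of_mem _ h
        · simp [h]))]
    rw [List.dropWhile_append] at hstrip
    cases ht : r2.reverse.dropWhile pvWsB with
    | nil =>
      -- value strips to the single non-ws char c
      rw [ht] at hstrip
      simp only [List.isEmpty_nil, if_true] at hstrip
      rw [List.dropWhile_cons, hcws] at hstrip
      simp only [Bool.false_eq_true, if_false, List.reverse_cons, List.reverse_nil,
        List.nil_append] at hstrip
      by_cases hc : c = '"'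
      · exact absurd (hstrip.trans (by rw [hc])) hne
      · rw [pvTailMatch, hr1]
        simp only []
        rw [if_neg hc, hstrip]
        rw [if_neg (by
          rintro ⟨h1, -⟩
          rw [PySem.Chars.startswith] at h1
          simp [List.isPrefixOf] at h1
          exact hc h1.symm)]
    | cons d midRev =>
      rw [ht] at hstrip
      simp only [List.isEmpty_cons, Bool.false_eq_true, if_false] at hstrip
      -- strip rest = c :: midRev.reverse ++ [d]
      have hstrip' : PySem.Chars.strip rest = c :: (midRev.reverse ++ [d]) := by
        rw [hstrip]; simp
      by_cases hc : c = '"'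
      · by_cases hd : d = '"'
        · rw [pvTailMatch, hr1]
          simp only []
          rw [if_pos hc, ht]
          simp only []
          rw [if_pos hd]
          rw [hstrip', if_pos ⟨by simp [PySem.Chars.startswith, List.isPrefixOf, hc],
            by
              rw [PySem.Chars.endswith]
              simp [List.isSuffixOf, List.isPrefixOf, hd]⟩]
          congr 1
          rw [PySem.Chars.slice_eq_listSlice, PySem.List.slice]
          simp [PySem.List.clampIdx]
          rw [if_neg (by omega)]
          rw [show midRev.length + 1 - 1 = midRev.reverse.length by simp]
          exact (List.take_left' rfl).symm
        · rw [pvTailMatch, hr1]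
          simp only []
          rw [if_pos hc, ht]
          simp only []
          rw [if_neg hd]
          rw [hstrip', if_neg (by
            rintro ⟨-, h2⟩
            rw [PySem.Chars.endswith] at h2
            have : ['"'] <:+ c :: (midRev.reverse ++ [d]) := by
              simpa [List.isSuffixOf_iff_suffix] using h2
            obtain ⟨u, hu⟩ := this
            have hgl : (u ++ ['"']).getLast? = some '"' := List.getLast?_concat
            rw [hu] at hgl
            have hgr : (c :: (midRev.reverse ++ [d])).getLast? = some d := by
              rw [show c :: (midRev.reverse ++ [d]) = (c :: midRev.reverse) ++ [d] by simp,
                List.getLast?_concat]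
            rw [hgr] at hgl
            exact hd (Option.some.inj hgl))]
      · rw [pvTailMatch, hr1]
        simp only []
        rw [if_neg hc]
        rw [hstrip', if_neg (by
          rintro ⟨h1, -⟩
          rw [PySem.Chars.startswith] at h1
          simp [List.isPrefixOf] at h1
          exact hc h1.symm)]

-- a successful tail match exhibits two quotes after the key
theorem pvTailMatch_quotes (rest g2 : List Char) (h : pvTailMatch rest = some g2) :
    2 ≤ rest.count '"' := by
  rw [pvTailMatch] at h
  cases hr1 : rest.dropWhile pvWsB with
  | nil => rw [hr1] at h; simp at h
  | cons c r2 =>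
    rw [hr1] at h
    simp only [] at h
    by_cases hc : c = '"'
    · rw [if_pos hc] at h
      cases ht : r2.reverse.dropWhile pvWsB with
      | nil => rw [ht] at h; simp at h
      | cons d midRev =>
        rw [ht] at h
        simp only [] at h
        by_cases hd : d = '"'
        · have hdmem : ('"' : Char) ∈ r2 := by
            rw [← List.mem_reverse]
            exact (List.dropWhile_sublist pvWsB).subset (ht ▸ (hd ▸ List.mem_cons_self))
          have h1 : 2 ≤ (c :: r2).count '"' := by
            rw [List.count_cons]
            have := List.count_pos_iff.mpr hdmem
            simp [hc]
            omega
          calc 2 ≤ (c :: r2).count '"' := h1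
            _ ≤ rest.count '"' := (hr1 ▸ List.dropWhile_sublist pvWsB).count_le _
        · rw [if_neg hd] at h; simp at h
    · rw [if_neg hc] at h; simp at h

-- per-line equivalence: one iteration of A's loop = one anchored match attempt of B's pattern
theorem pvFixLine_eq (ln : List Char)
    (hw : ∀ c ∈ ln, PySem.Chars.isspace c = pvWsB c)
    (hpre : ¬(PySem.Chars.isIn ['"', ':'] ln = true ∧ 2 < PySem.Chars.count ln ['"'] ∧
      PySem.Chars.strip (PySem.Chars.slice ln (some (PySem.Chars.find ln ['"', ':'] + 2)) none) = ['"'])) :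
    pvFixLineA ln = pvRepairLine ln := by
  by_cases hin : PySem.Chars.isIn ['"', ':'] ln = true
  · have hinf : ['"', ':'] <:+: ln := (PySem.Chars.isIn_iff_infix ['"', ':'] ln).mp hin
    have hfind : (0 : Int) ≤ PySem.Chars.find ln ['"', ':'] :=
      (PySem.Chars.find_nonneg_iff ln ['"', ':']).mpr hinf
    have hspec := PySem.Chars.find_spec hfind
    set jn := (PySem.Chars.find ln ['"', ':']).toNat with hjn
    have hksp : pvKeySplit [] ln
        = some ([] ++ ln.take (jn + 2),
                ln.drop (jn + 2)) :=
      pvKeySplit_of_first ln jn [] hspec.1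
        (fun k hk => hspec.2 k hk)
    have hcast : PySem.Chars.find ln ['"', ':'] + 2
        = ((jn + 2 : Nat) : Int) := by
      push_cast
      rw [Int.toNat_of_nonneg hfind]
    have hkey : PySem.Chars.slice ln none (some (PySem.Chars.find ln ['"', ':'] + 2))
        = ln.take (jn + 2) := by
      rw [hcast, PySem.Chars.slice_eq_listSlice, PySem.List.slice_to_natCast]
    have hrest : PySem.Chars.slice ln (some (PySem.Chars.find ln ['"', ':'] + 2)) none
        = ln.drop (jn + 2) := by
      rw [hcast, PySem.Chars.slice_eq_listSlice, PySem.List.slice_from_natCast]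
    rw [pvFixLineA, pvRepairLine, hksp]
    simp only [List.nil_append]
    by_cases hcnt : 2 < PySem.Chars.count ln ['"']
    · rw [if_pos ⟨hin, hcnt⟩, if_pos (show PySem.Chars.find ln ['"', ':'] ≠ -1 by omega)]
      rw [hrest, hkey]
      have hwrest : ∀ c ∈ ln.drop (jn + 2),
          PySem.Chars.isspace c = pvWsB c :=
        fun c hc => hw c (List.mem_of_mem_drop hc)
      have hlq : PySem.Chars.strip (ln.drop (jn + 2))
          ≠ ['"'] := by
        intro h
        exact hpre ⟨hin, hcnt, by rw [hrest]; exact h⟩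
      rw [pvTailMatch_spec _ hwrest hlq]
      by_cases hbr : PySem.Chars.startswith
            (PySem.Chars.strip (ln.drop (jn + 2))) ['"'] = true ∧
          PySem.Chars.endswith
            (PySem.Chars.strip (ln.drop (jn + 2))) ['"'] = true
      · rw [if_pos hbr, if_pos hbr]
      · rw [if_neg hbr, if_neg hbr]
    · rw [if_neg (fun h => hcnt h.2)]
      cases htm : pvTailMatch (ln.drop (jn + 2)) with
      | none => rfl
      | some g2 =>
        exfalso
        apply hcnt
        rw [pvCount_char]
        have h2 := pvTailMatch_quotes _ _ htm
        have hlt : jn < ln.length := by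
          have hlen := hspec.1.length_le
          simp only [List.length_drop, List.length_cons] at hlen
          omega
        obtain ⟨t, ht⟩ := hspec.1
        have h0 : ln.drop jn = '"' :: ':' :: t := by simpa using ht.symm
        have htk : ln.take (jn + 2) = ln.take jn ++ ['"', ':'] := by
          rw [List.take_add, h0]; rfl
        have hmem : ('"' : Char) ∈ ln.take (jn + 2) := by
          rw [htk]; simp
        have h1 := List.count_pos_iff.mpr hmem
        have hsplitc : ln.count '"'
            = (ln.take (jn + 2)).count '"'
              + (ln.drop (jn + 2)).count '"' := by
          rw [← List.count_append, List.take_append_drop]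
        omega
  · have hni : ¬ ['"', ':'] <:+: ln := fun h => hin ((PySem.Chars.isIn_iff_infix ['"', ':'] ln).mpr h)
    rw [pvFixLineA, if_neg (fun h => hin h.1), pvRepairLine, (pvKeySplit_none ln [] hni)]

-- ===== VERDICT (by name: the statement is the Claim_ definition above) =====
theorem attempt_json_repair_py_spec : Claim_equal_attempt_json_repair_py := by
  intro json_str hdom hpre
  unfold Spec_attempt_json_repair_py attempt_json_repair_py attempt_json_repair_py_alt
  simp only []
  rw [PySem.List.foldl_append_singleton_eq_map, List.nil_append]
  have hmap : List.map pvFixLineA (PySem.Chars.splitOn json_str.toList ['\n'])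
      = List.map pvRepairLine (PySem.Chars.splitOn json_str.toList ['\n']) := by
    refine List.map_congr_left fun line hline => pvFixLine_eq line ?_ (hpre line hline)
    intro c hc
    refine pvSplitOn_mem (fun c => PySem.Chars.isspace c = pvWsB c) json_str.toList ?_ line hline c hc
    intro c hcs hcn
    have hd : pvDomChar c = true := by
      have := hdom
      unfold Dom_attempt_json_repair_py pvDomStr at this
      exact List.all_eq_true.mp this c hcs
    exact pvWs_eq c hd hcn
  rw [hmap]
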